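-- pv_equiv track=rewrite | github.com/writecrow/crow_training | python/better_coding/2_using_functions.py | is_passive_sentence
-- ===== SOURCE A (Python) =====
-- def is_passive_sentence(sentence: str):
--     """ Passive Voice Analysis """
--     # 1. Define verbs that are used in passive voice constructions.
--     VERBS = ['is', 'was', 'were', 'be', 'being', 'been', 'have']
--     passive = False
--     words = sentence.split()
--     if len(words) > 0:
--         # Perform a simple check if the sentence contains a passive verb.
--         # If it doesn't, there's no reason to check further.
--         match = bool(set(VERBS) & set(words))
--         if match:
--             verb = False
--             # 3. Move sequentially through each of the words in the sentence.
--             # We record if a word is a passive verb, and then check if the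
--             # subsequent word is in past tense.
--             for word in words:
--                 past_tense = word[-2:] == 'ed'
--                 if verb and past_tense:
--                     passive = True
--                     break
--                 elif word in VERBS:
--                     verb = True
--                 else:
--                     verb = False
--     # Return True or False
--     return passive
-- ===== SOURCE B (Python) =====
-- def is_passive_sentence(sentence: str):
--     """Passive Voice Analysis via position sets: a word is passive-marking
--     when it directly follows a passive verb, so the sentence is passive iff
--     the set of positions right after a verb meets the set of past-tense
--     positions."""
--     VERBS = ['is', 'was', 'were', 'be', 'being', 'been', 'have']
--     words = sentence.split()
--     after_verb = {i + 1 for i, w in enumerate(words) if w in VERBS}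
--     past = {i for i, w in enumerate(words) if w[-2:] == 'ed'}
--     return bool(after_verb & past)
-- ===== Notes on version B (the rewrite author's own statement) =====
-- stated objective: alternative
-- what changed: Replaces A's sequential verb-flag state machine (with its set-intersection pre-screen and break) by two independent position-set comprehensions (indices right after a verb, indices of past-tense words) whose set intersection decides passivity.
import Mathlib
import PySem

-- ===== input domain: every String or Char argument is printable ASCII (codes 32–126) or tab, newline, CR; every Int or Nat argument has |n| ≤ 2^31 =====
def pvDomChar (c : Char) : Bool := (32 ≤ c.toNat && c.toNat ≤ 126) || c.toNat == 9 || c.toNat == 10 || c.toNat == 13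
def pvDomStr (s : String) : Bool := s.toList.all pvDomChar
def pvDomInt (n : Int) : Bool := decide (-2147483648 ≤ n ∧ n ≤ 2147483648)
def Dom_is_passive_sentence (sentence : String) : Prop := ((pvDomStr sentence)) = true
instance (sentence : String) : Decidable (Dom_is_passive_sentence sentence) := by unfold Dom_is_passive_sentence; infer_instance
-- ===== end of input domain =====

-- B replaces A's sequential verb-flag state machine (plus its set-intersection pre-screen and
-- break) by two independent position-set comprehensions intersected at the end (objective: alternative).

-- ===== PORT A =====
def pvVERBS : List String := ["is", "was", "were", "be", "being", "been", "have"]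

-- A's for-loop with the 'verb' flag and the break
def pvLoopA : List String → Bool → Bool
  | [], _ => false
  | word :: ws, verb =>
    let past_tense : Bool := PySem.Str.slice word (some (-2)) none == "ed"
    if verb && past_tense then true
    else if pvVERBS.contains word then pvLoopA ws true
    else pvLoopA ws false

def is_passive_sentence (sentence : String) : Bool :=
  let words := PySem.Str.split₀ sentence
  if words.length > 0 then
    let mtch : Bool := !(PySem.Set.inter (PySem.Set.ofList pvVERBS) (PySem.Set.ofList words)).isEmpty
    if mtch then pvLoopA words false else false
  else false

-- ===== PORT B =====
def is_passive_sentence_alt (sentence : String) : Bool :=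
  let words := PySem.Str.split₀ sentence
  let after_verb := PySem.Set.ofList ((PySem.List.enumerate words).filterMap
    (fun p => if pvVERBS.contains p.2 then some (p.1 + 1) else none))
  let past := PySem.Set.ofList ((PySem.List.enumerate words).filterMap
    (fun p => if PySem.Str.slice p.2 (some (-2)) none == "ed" then some p.1 else none))
  !(PySem.Set.inter after_verb past).isEmpty

-- ===== PRECONDITION & SPEC =====
def Spec_is_passive_sentence (sentence : String) (out : Bool) : Prop := out = is_passive_sentence_alt sentence
instance (sentence : String) (out : Bool) : Decidable (Spec_is_passive_sentence sentence out) := by unfold Spec_is_passive_sentence; infer_instance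

-- ===== CLAIM (what is proved, stated in full; the proofs are below) =====
def Claim_equal_is_passive_sentence : Prop := ∀ (sentence : String), Dom_is_passive_sentence sentence → Spec_is_passive_sentence sentence (is_passive_sentence sentence)

-- ===== LEMMAS AND PROOFS =====

def pvEd (w : String) : Bool := PySem.Str.slice w (some (-2)) none == "ed"

-- the sentence has an adjacent (verb, past-tense) pair
def pvPairEx (ws : List String) : Prop :=
  ∃ (k : Nat) (w w' : String), ws[k]? = some w ∧ ws[k+1]? = some w' ∧
    pvVERBS.contains w = true ∧ pvEd w' = true

lemma pvPairEx_nil : ¬ pvPairEx [] := by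
  rintro ⟨k, w, w', h, -, -, -⟩; simp at h

lemma pvPairEx_cons (w : String) (ws : List String) :
    pvPairEx (w :: ws) ↔
      (pvVERBS.contains w = true ∧ ∃ w', ws[0]? = some w' ∧ pvEd w' = true) ∨ pvPairEx ws := by
  constructor
  · rintro ⟨k, a, a', h1, h2, hv, he⟩
    cases k with
    | zero =>
      left
      simp only [List.getElem?_cons_zero, Option.some.injEq] at h1
      subst h1
      exact ⟨hv, a', by simpa using h2, he⟩
    | succ k =>
      right
      exact ⟨k, a, a', by simpa using h1, by simpa using h2, hv, he⟩
  · rintro (⟨hv, w', h0, he⟩ | ⟨k, a, a', h1, h2, hv, he⟩)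
    · exact ⟨0, w, w', by simp, by simpa using h0, hv, he⟩
    · exact ⟨k + 1, a, a', by simpa using h1, by simpa using h2, hv, he⟩

-- one unfolding step of A's loop
lemma pvLoopA_cons (w : String) (ws : List String) (v : Bool) :
    pvLoopA (w :: ws) v =
      (if v && pvEd w then true else pvLoopA ws (pvVERBS.contains w)) := by
  show (if v && pvEd w then true
        else if pvVERBS.contains w then pvLoopA ws true else pvLoopA ws false) = _
  cases pvVERBS.contains w <;> simp

-- characterisation of A's loop
lemma pvLoopA_iff (ws : List String) (v : Bool) :
    pvLoopA ws v = true ↔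
      (v = true ∧ ∃ w, ws[0]? = some w ∧ pvEd w = true) ∨ pvPairEx ws := by
  induction ws generalizing v with
  | nil => simp [pvLoopA, pvPairEx_nil]
  | cons w ws ih =>
    rw [pvLoopA_cons, pvPairEx_cons]
    by_cases hv : (v && pvEd w) = true
    · obtain ⟨hv1, hv2⟩ := Bool.and_eq_true_iff.mp hv
      simp only [if_pos hv]
      constructor
      · intro _; exact Or.inl ⟨hv1, w, by simp, hv2⟩
      · intro _; trivial
    · rw [if_neg hv, ih]
      have hvne : ¬ (v = true ∧ pvEd w = true) := by
        intro ⟨h1, h2⟩; exact hv (by simp [h1, h2])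
      constructor
      · rintro (⟨hc, hx⟩ | hp)
        · exact Or.inr (Or.inl ⟨hc, hx⟩)
        · exact Or.inr (Or.inr hp)
      · rintro (⟨h1, w', h0, he⟩ | ⟨hc, hx⟩ | hp)
        · simp only [List.getElem?_cons_zero, Option.some.injEq] at h0
          exact absurd ⟨h1, h0 ▸ he⟩ hvne
        · exact Or.inl ⟨hc, hx⟩
        · exact Or.inr hp

-- nonemptiness of an intersection of two ofList sets
lemma pvInterNonempty {α : Type} [DecidableEq α] (l₁ l₂ : List α) :
    (!(PySem.Set.inter (PySem.Set.ofList l₁) (PySem.Set.ofList l₂)).isEmpty) = true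
      ↔ ∃ x, x ∈ l₁ ∧ x ∈ l₂ := by
  simp only [Bool.not_eq_eq_eq_not, Bool.not_true, List.isEmpty_eq_false_iff,
    ← List.length_pos_iff, List.length_pos_iff_exists_mem]
  constructor
  · rintro ⟨x, hx⟩
    have hx' := (PySem.Set.mem_inter _ _ _).mp hx
    exact ⟨x, (PySem.Set.mem_ofList _ _).mp hx'.1, (PySem.Set.mem_ofList _ _).mp hx'.2⟩
  · rintro ⟨x, h1, h2⟩
    exact ⟨x, (PySem.Set.mem_inter _ _ _).mpr
      ⟨(PySem.Set.mem_ofList _ _).mpr h1, (PySem.Set.mem_ofList _ _).mpr h2⟩⟩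

-- characterisation of B's position-set intersection
lemma pvAlt_iff (ws : List String) :
    (!(PySem.Set.inter
        (PySem.Set.ofList ((PySem.List.enumerate ws).filterMap
          (fun p => if pvVERBS.contains p.2 then some (p.1 + 1) else none)))
        (PySem.Set.ofList ((PySem.List.enumerate ws).filterMap
          (fun p => if pvEd p.2 then some p.1 else none)))).isEmpty) = true
      ↔ pvPairEx ws := by
  rw [pvInterNonempty]
  constructor
  · rintro ⟨x, hx1, hx2⟩
    obtain ⟨p, hp, hpx⟩ := List.mem_filterMap.mp hx1
    obtain ⟨q, hq, hqx⟩ := List.mem_filterMap.mp hx2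
    obtain ⟨k, hk, rfl⟩ := (PySem.List.mem_enumerate_iff _ _ _).mp hp
    obtain ⟨j, hj, rfl⟩ := (PySem.List.mem_enumerate_iff _ _ _).mp hq
    simp only [zero_add] at hpx hqx
    split_ifs at hpx hqx with hv he
    · have hx : ((k : Int) + 1) = x := by simpa using hpx
      have hx' : ((j : Int)) = x := by simpa using hqx
      have hjk : j = k + 1 := by omega
      subst hjk
      exact ⟨k, ws[k], ws[k+1], List.getElem?_eq_getElem hk,
        List.getElem?_eq_getElem hj, hv, he⟩
  · rintro ⟨k, w, w', h1, h2, hv, he⟩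
    have hk : k < ws.length := (List.getElem?_eq_some_iff.mp h1).1
    have hk1 : k + 1 < ws.length := (List.getElem?_eq_some_iff.mp h2).1
    have hw : ws[k] = w := by simpa [List.getElem?_eq_getElem hk] using h1
    have hw' : ws[k+1] = w' := by simpa [List.getElem?_eq_getElem hk1] using h2
    refine ⟨(k : Int) + 1, ?_, ?_⟩
    · refine List.mem_filterMap.mpr ⟨((0 : Int) + (k : Nat), ws[k]),
        (PySem.List.mem_enumerate_iff _ _ _).mpr ⟨k, hk, rfl⟩, ?_⟩
      simp only [hw]
      rw [if_pos hv]
      simp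
    · refine List.mem_filterMap.mpr ⟨((0 : Int) + ((k + 1 : Nat) : Int), ws[k+1]),
        (PySem.List.mem_enumerate_iff _ _ _).mpr ⟨k + 1, hk1, rfl⟩, ?_⟩
      simp only [hw']
      rw [if_pos he]
      simp only [Option.some.injEq]
      push_cast
      ring

-- a verb occurring in an adjacent pair occurs in the list (for A's pre-screen)
lemma pvPairEx_verb_mem (ws : List String) (h : pvPairEx ws) :
    ∃ x, x ∈ pvVERBS ∧ x ∈ ws := by
  obtain ⟨k, w, w', h1, -, hv, -⟩ := h
  exact ⟨w, by simpa using hv, List.mem_of_getElem? h1⟩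

-- characterisation of A
lemma pvA_iff (ws : List String) :
    (if ws.length > 0 then
      (if !(PySem.Set.inter (PySem.Set.ofList pvVERBS) (PySem.Set.ofList ws)).isEmpty
       then pvLoopA ws false else false)
     else false) = true ↔ pvPairEx ws := by
  by_cases hlen : ws.length > 0
  · rw [if_pos hlen]
    by_cases hm : (!(PySem.Set.inter (PySem.Set.ofList pvVERBS) (PySem.Set.ofList ws)).isEmpty) = true
    · rw [if_pos hm, pvLoopA_iff]
      simp
    · rw [if_neg hm]
      constructor
      · intro h; exact absurd h (by simp)
      · intro hp; exact absurd ((pvInterNonempty _ _).mpr (pvPairEx_verb_mem ws hp)) hm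
  · rw [if_neg hlen]
    have : ws = [] := List.eq_nil_of_length_eq_zero (by omega)
    subst this
    simp [pvPairEx_nil]

-- ===== VERDICT (by name: the statement is the Claim_ definition above) =====
theorem is_passive_sentence_spec : Claim_equal_is_passive_sentence := by
  intro sentence _
  unfold Spec_is_passive_sentence is_passive_sentence is_passive_sentence_alt
  set ws := PySem.Str.split₀ sentence with hws
  have hA := pvA_iff ws
  have hB := pvAlt_iff ws
  simp only [pvEd] at hB
  rw [← hB] at hA
  exact Bool.coe_iff_coe.mp hA
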